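-- pv_equiv track=rewrite | github.com/piftai/study | python-solutions/yandex1.py | solution
-- ===== SOURCE A (Python) =====
-- def solution(volumes):
--     max_volume = max(volumes)
--     operations = 0
--     for i in range(len(volumes) - 1, -1, -1):
--         if volumes[i] < max_volume:
--             diff = max_volume - volumes[i]
--             operations += diff
--             # Добавляем diff к первым (i+1) чанам
--             for j in range(i + 1):
--                 volumes[j] += diff
--     return operations
-- ===== SOURCE B (Python) =====
-- def solution(volumes):
--     m = max(volumes)
--     s = 0
--     for v in reversed(volumes):
--         d = m - (v + s)
--         if d > 0:
--             s += d
--     return s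
-- ===== Notes on version B (the rewrite author's own statement) =====
-- stated objective: faster
-- what changed: Replaces the quadratic backward loop that physically adds diff to every prefix element with a single backward pass that keeps only the running sum of diffs (each element's current value is original + running sum), so the inner prefix-update loop disappears.
import Mathlib
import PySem

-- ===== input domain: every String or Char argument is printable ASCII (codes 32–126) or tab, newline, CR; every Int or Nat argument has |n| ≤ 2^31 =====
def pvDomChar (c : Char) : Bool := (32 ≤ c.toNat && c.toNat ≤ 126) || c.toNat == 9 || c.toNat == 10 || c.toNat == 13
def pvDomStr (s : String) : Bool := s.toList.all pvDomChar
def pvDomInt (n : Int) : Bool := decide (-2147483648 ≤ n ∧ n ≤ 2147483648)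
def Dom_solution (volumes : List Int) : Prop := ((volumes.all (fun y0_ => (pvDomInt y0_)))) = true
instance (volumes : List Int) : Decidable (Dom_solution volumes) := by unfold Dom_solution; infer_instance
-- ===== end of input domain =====

-- B replaces A's quadratic prefix-updating loop by a single backward pass with a running sum (objective: faster).
-- A mutates its argument in place; the equivalence proved here is about the RETURN value only (B does not mutate).

-- ===== PORT A =====
-- body of A's outer for-loop: if volumes[i] < max then add diff to volumes[0..i] and to operations
def aStep (maxVolume : Int) (st : List Int × Int) (i : Int) : List Int × Int :=
  let vi := PySem.List.pyGetD st.1 i 0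
  if vi < maxVolume then
    let diff := maxVolume - vi
    ((PySem.List.pyRange 0 (i + 1) 1).foldl
        (fun vs j => vs.set j.toNat (vs.getD j.toNat 0 + diff)) st.1,
     st.2 + diff)
  else st

def solution (volumes : List Int) : Int :=
  match PySem.List.max? volumes (fun x => x) with
  | none => 0   -- unreachable under Pre_solution: Python's max([]) raises ValueError
  | some maxVolume =>
    ((PySem.List.pyRange ((volumes.length : Int) - 1) (-1) (-1)).foldl
        (aStep maxVolume) (volumes, 0)).2

-- ===== PORT B =====
def bStep (m s v : Int) : Int :=
  if m - (v + s) > 0 then s + (m - (v + s)) else s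

def solution_alt (volumes : List Int) : Int :=
  match PySem.List.max? volumes (fun x => x) with
  | none => 0   -- unreachable under Pre_solution: max([]) raises in B too
  | some m => volumes.reverse.foldl (bStep m) 0

-- ===== PRECONDITION & SPEC =====
-- Pre_ excludes only the empty list, on which both Pythons raise ValueError (max of empty sequence).
def Pre_solution (volumes : List Int) : Prop := volumes ≠ []
instance (volumes : List Int) : Decidable (Pre_solution volumes) := by unfold Pre_solution; infer_instance
def pvWitness_solution : List Int := [1, 3, 2]

def Spec_solution (volumes : List Int) (out : Int) : Prop := out = solution_alt volumes
instance (volumes : List Int) (out : Int) : Decidable (Spec_solution volumes out) := by unfold Spec_solution; infer_instance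

-- ===== CLAIM (what is proved, stated in full; the proofs are below) =====
def Claim_equal_solution : Prop := ∀ (volumes : List Int), Dom_solution volumes → Pre_solution volumes → Spec_solution volumes (solution volumes)

-- ===== LEMMAS AND PROOFS =====

-- A's inner loop adds diff to positions 0..t-1 and changes nothing else.
lemma inner_spec (diff : Int) (t : Nat) (vs : List Int) (ht : t ≤ vs.length) :
    ((PySem.List.pyRange 0 (t : Int) 1).foldl
        (fun vs j => vs.set j.toNat (vs.getD j.toNat 0 + diff)) vs).length = vs.length
    ∧ ∀ p : Nat, ((PySem.List.pyRange 0 (t : Int) 1).foldl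
        (fun vs j => vs.set j.toNat (vs.getD j.toNat 0 + diff)) vs).getD p 0
        = if p < t then vs.getD p 0 + diff else vs.getD p 0 := by
  induction t with
  | zero =>
    simp [PySem.List.pyRange_one_eq_nil]
  | succ t ih =>
    have ih' := ih (Nat.le_of_succ_le ht)
    have hcast : ((t + 1 : Nat) : Int) = (t : Int) + 1 := by push_cast; ring
    rw [hcast, PySem.List.pyRange_one_succ_right (by exact_mod_cast Nat.zero_le t),
        List.foldl_append]
    set r := (PySem.List.pyRange 0 (t : Int) 1).foldl
        (fun vs j => vs.set j.toNat (vs.getD j.toNat 0 + diff)) vs with hr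
    have hlen : r.length = vs.length := ih'.1
    have hlt : t < vs.length := ht
    have hrt : r.getD t 0 = vs.getD t 0 := by
      rw [ih'.2 t]; simp
    constructor
    · simp [hlen]
    · intro p
      simp only [List.foldl_cons, List.foldl_nil, Int.toNat_natCast]
      by_cases hp : p = t
      · subst hp
        have : (r.set p (r.getD p 0 + diff)).getD p 0 = r.getD p 0 + diff := by
          have hplen : p < r.length := by omega
          simp [List.getD, List.getElem?_set_self hplen]
        rw [this, hrt]
        simp
      · have : (r.set t (r.getD t 0 + diff)).getD p 0 = r.getD p 0 := by
          simp [List.getD, List.getElem?_set_ne (by omega : t ≠ p)]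
        rw [this, ih'.2 p]
        by_cases h2 : p < t
        · simp [h2, Nat.lt_succ_of_lt h2]
        · have h3 : ¬ p < t + 1 := by omega
          simp [h2, h3]

-- A's backward loop over indices k-1,…,0, started in a state whose first k slots hold
-- original + S with accumulated operations S, finishes with B's fold over the reversed k-prefix.
lemma outer_spec (volumes : List Int) (m : Int) :
    ∀ (k : Nat), k ≤ volumes.length → ∀ (vs : List Int) (S : Int),
      vs.length = volumes.length →
      (∀ p : Nat, p < k → vs.getD p 0 = volumes.getD p 0 + S) →
      ((PySem.List.pyRange ((k : Int) - 1) (-1) (-1)).foldl (aStep m) (vs, S)).2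
        = (volumes.take k).reverse.foldl (bStep m) S := by
  intro k
  induction k with
  | zero =>
    intro _ vs S _ _
    simp [PySem.List.pyRange_neg_one_eq_nil]
  | succ k ih =>
    intro hk vs S hlen hinv
    have hcast : ((k + 1 : Nat) : Int) - 1 = (k : Int) := by push_cast; ring
    rw [hcast, PySem.List.pyRange_neg_one_cons (by omega), List.foldl_cons]
    have hklen : k < vs.length := by omega
    have hvi : PySem.List.pyGetD vs (k : Int) 0 = volumes.getD k 0 + S := by
      rw [PySem.List.pyGetD_natCast]
      exact hinv k (Nat.lt_succ_self k)
    -- the reversed (k+1)-prefix peels volumes[k] first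
    have htake : (volumes.take (k + 1)).reverse = volumes.getD k 0 :: (volumes.take k).reverse := by
      have hk' : k < volumes.length := by omega
      rw [List.take_add_one, List.getElem?_eq_getElem hk']
      simp [List.getD, List.getElem?_eq_getElem hk']
    rw [htake, List.foldl_cons]
    by_cases hlt : volumes.getD k 0 + S < m
    · have hstep : aStep m (vs, S) (k : Int)
          = ((PySem.List.pyRange 0 ((k : Int) + 1) 1).foldl
              (fun vs j => vs.set j.toNat (vs.getD j.toNat 0 + (m - (volumes.getD k 0 + S)))) vs,
             S + (m - (volumes.getD k 0 + S))) := by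
        simp only [aStep, hvi]
        rw [if_pos hlt]
      rw [hstep]
      have hinner := inner_spec (m - (volumes.getD k 0 + S)) (k + 1) vs (by omega)
      have hcast2 : ((k + 1 : Nat) : Int) = (k : Int) + 1 := by push_cast; ring
      rw [hcast2] at hinner
      rw [ih (by omega) _ (S + (m - (volumes.getD k 0 + S))) (by rw [hinner.1, hlen])
            (by intro p hp
                rw [hinner.2 p, if_pos (by omega), hinv p (by omega)]
                ring)]
      have hbs : bStep m S (volumes.getD k 0) = S + (m - (volumes.getD k 0 + S)) := by
        simp only [bStep]
        rw [if_pos (by omega)]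
      rw [hbs]
    · have hstep : aStep m (vs, S) (k : Int) = (vs, S) := by
        simp only [aStep, hvi]
        rw [if_neg hlt]
      rw [hstep, ih (by omega) vs S hlen (fun p hp => hinv p (by omega))]
      have hbs : bStep m S (volumes.getD k 0) = S := by
        simp only [bStep]
        rw [if_neg (by omega)]
      rw [hbs]

-- ===== VERDICT (by name: the statement is the Claim_ definition above) =====
theorem solution_spec : Claim_equal_solution := by
  intro volumes _ hpre
  unfold Spec_solution solution solution_alt
  cases hmax : PySem.List.max? volumes (fun x => x) with
  | none => rfl
  | some m =>
    have h := outer_spec volumes m volumes.length le_rfl volumes 0 rfl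
        (by intro p _; ring)
    simp only [List.take_length] at h
    simpa using h
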